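-- pv_equiv track=rewrite | github.com/supertom01/adventOfCode | 2024/day9.py | find_gap
-- ===== SOURCE A (Python) =====
-- def find_gap(memory: list[int], block_length: int) -> int | None:
--     """
--     Find the first index of a gap in the given memory that is of the minimal length.
--     """
--     i = 0
--     while i < len(memory):
--         if memory[i] != -1:
--             i += 1
--         else:
--             gap_size = 0
--             gap_location = i
--
--             # Determine the gap size
--             while i < len(memory) and memory[i] == -1:
--                 i += 1
--                 gap_size += 1
--
--             if gap_size >= block_length:
--                 return gap_location
-- ===== SOURCE B (Python) =====
-- def find_gap(memory, block_length):
--     # phase 1: run-length encode memory as (value, run length) pairs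
--     rs = []
--     i = 0
--     while i < len(memory):
--         j = i + 1
--         while j < len(memory) and memory[j] == memory[i]:
--             j += 1
--         rs.append((memory[i], j - i))
--         i = j
--     # phase 2: scan the runs, keeping the running start index
--     start = 0
--     for value, length in rs:
--         if value == -1 and length >= block_length:
--             return start
--         start += length
--     return None
-- ===== Notes on version B (the rewrite author's own statement) =====
-- stated objective: alternative
-- what changed: Replaces A's nested index-driven while loops with a run-length encoding of the list (value, run length pairs) followed by a single scan that returns the start index of the first run of -1 whose length reaches block_length.
import Mathlib
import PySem

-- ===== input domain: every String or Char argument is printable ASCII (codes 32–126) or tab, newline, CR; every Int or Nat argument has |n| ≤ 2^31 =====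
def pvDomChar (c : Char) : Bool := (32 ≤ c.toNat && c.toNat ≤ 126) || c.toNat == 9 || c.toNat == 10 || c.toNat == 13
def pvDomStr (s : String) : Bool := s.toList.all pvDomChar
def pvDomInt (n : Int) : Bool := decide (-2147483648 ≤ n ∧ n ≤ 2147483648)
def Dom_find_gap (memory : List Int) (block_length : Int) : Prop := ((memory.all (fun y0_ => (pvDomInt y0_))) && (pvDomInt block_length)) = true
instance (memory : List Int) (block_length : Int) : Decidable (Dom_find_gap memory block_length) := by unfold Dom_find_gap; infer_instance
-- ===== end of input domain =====

-- B replaces A's nested index-driven search loops with a run-length encoding pass (value, run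
-- length pairs) followed by a single scan over the runs (alternative decomposition, same O(n) cost).

-- ===== PORT A =====
-- inner while loop: 'while i < len(memory) and memory[i] == -1: i += 1; gap_size += 1'
-- (fuel only makes the loop total; memory.length fuel always suffices since i strictly increases)
def skip_gap (memory : List Int) : Nat → Nat → Nat → Nat × Nat
  | 0, i, gap_size => (i, gap_size)
  | fuel + 1, i, gap_size =>
    if i < memory.length ∧ memory.getD i 0 = -1 then
      skip_gap memory fuel (i + 1) (gap_size + 1)
    else (i, gap_size)

-- outer while loop of A (fuel memory.length + 1 suffices: i strictly increases each iteration)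
def find_gap_loop (memory : List Int) (block_length : Int) : Nat → Nat → Option Int
  | 0, _ => none
  | fuel + 1, i =>
    if i < memory.length then
      if memory.getD i 0 ≠ -1 then
        find_gap_loop memory block_length fuel (i + 1)
      else
        let p := skip_gap memory memory.length i 0
        if block_length ≤ (p.2 : Int) then some (i : Int)
        else find_gap_loop memory block_length fuel p.1
    else none

def find_gap (memory : List Int) (block_length : Int) : Option Int :=
  find_gap_loop memory block_length (memory.length + 1) 0

-- ===== PORT B =====
-- inner while loop of phase 1: 'while j < len(memory) and memory[j] == memory[i]: j += 1'
-- (fuel only makes the loop total; memory.length fuel always suffices)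
def run_end (memory : List Int) (x : Int) : Nat → Nat → Nat
  | 0, j => j
  | fuel + 1, j =>
    if j < memory.length ∧ memory.getD j 0 = x then run_end memory x fuel (j + 1) else j

-- phase 1: run-length encode memory as (value, run length) pairs, starting at index i
-- (fuel memory.length + 1 suffices: i strictly increases each iteration)
def runs_loop (memory : List Int) : Nat → Nat → List (Int × Nat)
  | 0, _ => []
  | fuel + 1, i =>
    if i < memory.length then
      (memory.getD i 0, run_end memory (memory.getD i 0) memory.length (i + 1) - i) ::
        runs_loop memory fuel (run_end memory (memory.getD i 0) memory.length (i + 1))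
    else []

-- phase 2: scan over the runs, keeping the running start index
def go_runs (block_length : Int) (start : Int) : List (Int × Nat) → Option Int
  | [] => none
  | (v, n) :: rest =>
    if v = -1 ∧ block_length ≤ (n : Int) then some start
    else go_runs block_length (start + (n : Int)) rest

def find_gap_alt (memory : List Int) (block_length : Int) : Option Int :=
  go_runs block_length 0 (runs_loop memory (memory.length + 1) 0)

-- ===== PRECONDITION & SPEC =====
def Spec_find_gap (memory : List Int) (block_length : Int) (out : Option Int) : Prop := out = find_gap_alt memory block_length
instance (memory : List Int) (block_length : Int) (out : Option Int) : Decidable (Spec_find_gap memory block_length out) := by unfold Spec_find_gap; infer_instance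

-- ===== CLAIM (what is proved, stated in full; the proofs are below) =====
def Claim_equal_find_gap : Prop := ∀ (memory : List Int) (block_length : Int), Dom_find_gap memory block_length → Spec_find_gap memory block_length (find_gap memory block_length)

-- ===== LEMMAS AND PROOFS =====

-- length of the run of value x in memory starting at index i
def runLen (memory : List Int) (x : Int) (i : Nat) : Nat :=
  ((memory.drop i).takeWhile (fun y => y == x)).length

theorem runLen_succ (memory : List Int) (x : Int) (i : Nat)
    (hi : i < memory.length) (hx : memory.getD i 0 = x) :
    runLen memory x i = 1 + runLen memory x (i + 1) := by
  have hd : memory.drop i = memory[i] :: memory.drop (i + 1) := List.drop_eq_getElem_cons hi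
  have hg : memory[i] = x := by rwa [List.getD_eq_getElem _ _ hi] at hx
  unfold runLen
  rw [hd, hg]
  simp only [List.takeWhile, beq_self_eq_true, List.length_cons]
  omega

theorem runLen_zero (memory : List Int) (x : Int) (i : Nat)
    (h : ¬(i < memory.length ∧ memory.getD i 0 = x)) :
    runLen memory x i = 0 := by
  unfold runLen
  rcases Nat.lt_or_ge i memory.length with hi | hi
  · have hd : memory.drop i = memory[i] :: memory.drop (i + 1) := List.drop_eq_getElem_cons hi
    have hg : memory[i] ≠ x := by
      intro hc
      exact h ⟨hi, by rw [List.getD_eq_getElem _ _ hi, hc]⟩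
    have hbf : (memory[i] == x) = false := by simp [hg]
    rw [hd]
    simp [List.takeWhile, hbf]
  · rw [List.drop_eq_nil_of_le hi]
    simp

-- closed form of B's inner loop
theorem run_end_eq (memory : List Int) (x : Int) : ∀ (fuel j : Nat), memory.length - j ≤ fuel →
    run_end memory x fuel j = j + runLen memory x j := by
  intro fuel
  induction fuel with
  | zero =>
    intro j h
    rw [run_end, runLen_zero memory x j (by omega)]
    omega
  | succ fuel ih =>
    intro j h
    by_cases hc : j < memory.length ∧ memory.getD j 0 = x
    · rw [run_end, if_pos hc, ih (j + 1) (by omega),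
        runLen_succ memory x j hc.1 hc.2]
      omega
    · rw [run_end, if_neg hc, runLen_zero memory x j hc]
      omega

-- closed form of A's inner loop
theorem skip_gap_eq (memory : List Int) : ∀ (fuel i g : Nat), memory.length - i ≤ fuel →
    skip_gap memory fuel i g = (i + runLen memory (-1) i, g + runLen memory (-1) i) := by
  intro fuel
  induction fuel with
  | zero =>
    intro i g h
    rw [skip_gap, runLen_zero memory (-1) i (by omega)]
    simp
  | succ fuel ih =>
    intro i g h
    by_cases hc : i < memory.length ∧ memory.getD i 0 = -1
    · rw [skip_gap, if_pos hc, ih (i + 1) (g + 1) (by omega),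
        runLen_succ memory (-1) i hc.1 hc.2, Prod.mk.injEq]
      omega
    · rw [skip_gap, if_neg hc, runLen_zero memory (-1) i hc]
      simp

-- runs_loop does not depend on the fuel once the fuel is sufficient
theorem runs_loop_congr (memory : List Int) : ∀ (fuel₁ : Nat) {fuel₂ i : Nat},
    memory.length - i < fuel₁ → memory.length - i < fuel₂ →
    runs_loop memory fuel₁ i = runs_loop memory fuel₂ i := by
  intro fuel₁
  induction fuel₁ with
  | zero => omega
  | succ fuel ih =>
    intro fuel₂ i h1 h2
    match fuel₂, h2 with
    | fuel' + 1, h2 =>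
      by_cases hi : i < memory.length
      · simp only [runs_loop, if_pos hi]
        have hre : run_end memory (memory.getD i 0) memory.length (i + 1) =
            (i + 1) + runLen memory (memory.getD i 0) (i + 1) :=
          run_end_eq memory _ memory.length (i + 1) (by omega)
        congr 1
        exact ih (by omega) (by omega)
      · simp only [runs_loop, if_neg hi]

-- skipping one non-(-1) element is absorbed by the run it heads
theorem go_runs_step_ne (memory : List Int) (bl s : Int) :
    ∀ (fuel fuel' i : Nat), i < memory.length → memory.getD i 0 ≠ -1 →
    memory.length - i < fuel → memory.length - (i + 1) < fuel' →
    go_runs bl s (runs_loop memory fuel i) = go_runs bl (s + 1) (runs_loop memory fuel' (i + 1)) := by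
  intro fuel fuel' i hi hx h1 h2
  match fuel, h1 with
  | fuel + 1, h1 =>
    set x := memory.getD i 0 with hxdef
    have hre : run_end memory x memory.length (i + 1) = (i + 1) + runLen memory x (i + 1) :=
      run_end_eq memory x memory.length (i + 1) (by omega)
    rw [runs_loop, if_pos hi, ← hxdef, go_runs]
    simp only [hx, false_and, if_false]
    by_cases hc : i + 1 < memory.length ∧ memory.getD (i + 1) 0 = x
    · -- the next element continues the same run
      match fuel', h2 with
      | fuel' + 1, h2 =>
        have hre' : run_end memory x memory.length (i + 2) = (i + 2) + runLen memory x (i + 2) :=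
          run_end_eq memory x memory.length (i + 2) (by omega)
        have hrl : runLen memory x (i + 1) = 1 + runLen memory x (i + 2) :=
          runLen_succ memory x (i + 1) hc.1 hc.2
        rw [runs_loop, if_pos hc.1, hc.2, go_runs]
        simp only [hx, false_and, if_false]
        rw [hre, hre']
        have e1 : (i + 1) + runLen memory x (i + 1) - i = 1 + runLen memory x (i + 1) := by omega
        have e2 : (i + 2) + runLen memory x (i + 2) - (i + 1) = 1 + runLen memory x (i + 2) := by
          omega
        have e3 : (i + 2) + runLen memory x (i + 2) = (i + 1) + runLen memory x (i + 1) := by omega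
        rw [e1, e2, e3]
        have e4 : s + ((1 + runLen memory x (i + 1) : Nat) : Int) =
            s + 1 + ((1 + runLen memory x (i + 2) : Nat) : Int) := by
          push_cast
          omega
        rw [e4]
        exact congrArg (go_runs bl _)
          (runs_loop_congr memory fuel (by omega) (by omega))
    · -- the run at i has length 1
      have hrl : runLen memory x (i + 1) = 0 := runLen_zero memory x (i + 1) hc
      rw [hre, hrl]
      have e1 : (i + 1) + 0 - i = 1 := by omega
      have e2 : (i + 1) + 0 = i + 1 := by omega
      rw [e1, e2]
      simp only [Nat.cast_one]
      exact congrArg (go_runs bl _) (runs_loop_congr memory fuel (by omega) (by omega))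

-- main loop invariant: A's outer loop at index i equals B's scan over the runs from index i
theorem find_gap_loop_eq (memory : List Int) (bl : Int) : ∀ (fuel i : Nat),
    memory.length - i < fuel →
    find_gap_loop memory bl fuel i = go_runs bl (i : Int) (runs_loop memory fuel i) := by
  intro fuel
  induction fuel with
  | zero => omega
  | succ fuel ih =>
    intro i hfu
    by_cases hi : i < memory.length
    · by_cases hx : memory.getD i 0 = -1
      · -- gap case
        set T := runLen memory (-1) i with hT
        have hT1 : T = 1 + runLen memory (-1) (i + 1) := runLen_succ memory (-1) i hi hx
        have hsk : skip_gap memory memory.length i 0 = (i + T, T) := by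
          rw [skip_gap_eq memory memory.length i 0 (by omega)]
          simp [hT]
        have hre : run_end memory (memory.getD i 0) memory.length (i + 1) = i + T := by
          rw [hx, run_end_eq memory (-1) memory.length (i + 1) (by omega)]
          omega
        rw [find_gap_loop, if_pos hi]
        simp only [hx, ne_eq, not_true_eq_false, if_false, hsk]
        rw [runs_loop, if_pos hi, hre, hx, go_runs]
        have hsub : i + T - i = T := by omega
        rw [hsub]
        by_cases hbl : bl ≤ (T : Int)
        · rw [if_pos hbl, if_pos ⟨rfl, hbl⟩]
        · rw [if_neg hbl, if_neg (fun hcc => hbl hcc.2), ih (i + T) (by omega)]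
          have e1 : ((i + T : Nat) : Int) = (i : Int) + (T : Int) := by push_cast; ring
          rw [e1]
      · -- non-gap case
        rw [find_gap_loop, if_pos hi]
        simp only [hx, ne_eq, not_false_eq_true, if_true]
        rw [ih (i + 1) (by omega),
          go_runs_step_ne memory bl (i : Int) (fuel + 1) fuel i hi hx (by omega) (by omega)]
        have e1 : ((i + 1 : Nat) : Int) = (i : Int) + 1 := by push_cast; ring
        rw [e1]
    · rw [find_gap_loop, if_neg hi, runs_loop, if_neg hi, go_runs]

-- ===== VERDICT (by name: the statement is the Claim_ definition above) =====
theorem find_gap_spec : Claim_equal_find_gap := by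
  intro memory block_length _
  unfold Spec_find_gap find_gap find_gap_alt
  exact find_gap_loop_eq memory block_length (memory.length + 1) 0 (by omega)
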